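-- pv_equiv track=rewrite | github.com/gcp825/advent_of_code | 2023/python/03.py | get_parts_and_gears
-- ===== SOURCE A (Python) =====
-- def get_parts_and_gears(grid):
--
--     parts = [];  possible_gears = dict();  max_y = len(grid)-1;  max_x = len(grid[0])-1
--
--     for y in range(max_y+1):
--
--         x = 0
--         while x <= max_x:
--
--             if not grid[y][x].isdigit(): x += 1
--             else:
--                 x, coords = get_number_coords(grid,y,x,max_x)
--                 adjacent_symbols = get_symbols(grid,*coords,max_y,max_x)
--
--                 if adjacent_symbols:
--                     parts += [int(grid[coords[0]][coords[1]:coords[2]+1])]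
--                     for coords in [c for s,c in adjacent_symbols if s == '*']:
--                         possible_gears[coords] = possible_gears.get(coords,[]) + parts[-1:]
--
--     return parts, [p for p in possible_gears.values() if len(p) == 2]
--
-- def get_number_coords(grid,y,x1,max_x):
--
--     x2 = x1
--     while x2 <= max_x and grid[y][x2].isdigit(): x2 += 1
--
--     return x2, (y,x1,x2-1)
--
-- def adjacent_coords(y,x1,x2):
--
--     return [(yy,xx) for yy in range(y-1,y+2) for xx in range(x1-1,x2+2) if (yy,xx) not in [(y,x) for x in range(x1,x2+1)]]
--
-- def get_symbols(grid,y,x1,x2,max_y,max_x):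
--
--     coords = [(yy,xx) for yy,xx in adjacent_coords(y,x1,x2) if 0 <= yy <= max_y and 0 <= xx <= max_x]
--
--     return [(s,c) for s,c in [(grid[yy][xx], (yy,xx)) for yy,xx in coords] if s != '.' and not s.isdigit()]
-- ===== SOURCE B (Python) =====
-- def get_parts_and_gears(grid):
--
--     w = len(grid[0])
--
--     # pass 1: one tokenizer scan per row yields BOTH the numbers (in reading
--     # order, as (y, x1, x2, value)) and, per row, the ascending list of
--     # symbol cells (x, char).
--     numbers = []
--     sym_rows = []
--     for y, row in enumerate(grid):
--         nums, syms = _tokenize(row[:w], y)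
--         numbers += nums
--         sym_rows.append(syms)
--
--     # pass 2: interval join — each number's column window [x1-1, x2+1] is
--     # matched against the sorted symbol list of the three rows y-1, y, y+1
--     # (early break once past the window); no grid cell is ever probed.
--     parts = []
--     gears = {}
--     for y, x1, x2, val in numbers:
--         hit = False
--         for r in (y - 1, y, y + 1):
--             if 0 <= r < len(grid):
--                 for c, ch in sym_rows[r]:
--                     if c > x2 + 1:
--                         break
--                     if c >= x1 - 1:
--                         hit = True
--                         if ch == '*':
--                             gears[(r, c)] = gears.get((r, c), []) + [val]
--         if hit:
--             parts.append(val)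
--
--     return parts, [g for g in gears.values() if len(g) == 2]
--
-- def _tokenize(row, y):
--     nums = []
--     syms = []
--     x = 0
--     w = len(row)
--     while x < w:
--         if row[x].isdigit():
--             x1 = x
--             while x < w and row[x].isdigit():
--                 x += 1
--             nums.append((y, x1, x - 1, int(row[x1:x])))
--         else:
--             if row[x] != '.':
--                 syms.append((x, row[x]))
--             x += 1
--     return nums, syms
-- ===== Notes on version B (the rewrite author's own statement) =====
-- stated objective: alternative
-- what changed: A interleaves number detection with per-number neighbourhood probing (enumerating every bounding-box cell via adjacent_coords with a quadratic exclusion-list check and reading the grid at each cell); B tokenizes each row once into numbers plus a sorted per-row symbol list, then matches each number by an interval join of its column window [x1-1, x2+1] against the symbol lists of rows y-1..y+1 with an early break, so the matching pass never reads a grid cell and does work proportional to nearby symbols instead of box size.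
import Mathlib
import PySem

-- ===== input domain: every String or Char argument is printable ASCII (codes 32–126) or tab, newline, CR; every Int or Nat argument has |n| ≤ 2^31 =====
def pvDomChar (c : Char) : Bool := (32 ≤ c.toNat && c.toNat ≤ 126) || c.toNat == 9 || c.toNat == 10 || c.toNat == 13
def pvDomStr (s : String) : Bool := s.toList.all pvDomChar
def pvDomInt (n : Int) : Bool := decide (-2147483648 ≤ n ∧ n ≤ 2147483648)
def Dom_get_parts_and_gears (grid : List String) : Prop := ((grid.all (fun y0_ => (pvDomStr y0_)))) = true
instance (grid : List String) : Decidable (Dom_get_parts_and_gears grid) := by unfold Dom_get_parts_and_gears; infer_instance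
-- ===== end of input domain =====

-- B replaces A's per-number neighbour-cell probing (enumerate every cell of the bounding box, with an
-- exclusion list, and test the grid there) by a tokenizer pass that extracts numbers AND per-row sorted
-- symbol lists in one scan, followed by an interval join of each number's column window against those
-- lists with an early break — no grid cell is probed in the matching pass (objective: alternative).


-- ===== PORT A =====

-- the symbol test of get_symbols: `s != '.' and not s.isdigit()`
def pvSymTest (c : Char) : Bool := !(c == '.') && !(PySem.Chars.isdigit c)

-- grid[y][x], total form ('.' default; in range under Pre_)
def pvCharA (grid : List String) (y x : Int) : Char :=
  (PySem.Str.pyGet? (PySem.List.pyGetD grid y "") x).getD '.'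

-- the while loop of get_number_coords: `while x2 <= max_x and grid[y][x2].isdigit(): x2 += 1`
def pvNumEnd (grid : List String) (y maxx : Int) (x2 : Int) (fuel : Nat) : Int :=
  match fuel with
  | 0 => x2
  | f + 1 =>
    if decide (x2 ≤ maxx) && PySem.Chars.isdigit (pvCharA grid y x2) then
      pvNumEnd grid y maxx (x2 + 1) f
    else x2

-- adjacent_coords(y, x1, x2)
def pvAdjacent (y x1 x2 : Int) : List (Int × Int) :=
  (PySem.List.pyRange (y - 1) (y + 2) 1).flatMap (fun yy =>
    ((PySem.List.pyRange (x1 - 1) (x2 + 2) 1).filter (fun xx =>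
      !(((PySem.List.pyRange x1 (x2 + 1) 1).map (fun x => (y, x))).contains (yy, xx)))).map
      (fun xx => (yy, xx)))

-- get_symbols(grid, y, x1, x2, max_y, max_x)
def pvGetSymbols (grid : List String) (y x1 x2 maxy maxx : Int) : List (Char × (Int × Int)) :=
  let coords := (pvAdjacent y x1 x2).filter
    (fun p => decide (0 ≤ p.1) && decide (p.1 ≤ maxy) && decide (0 ≤ p.2) && decide (p.2 ≤ maxx))
  (coords.map (fun p => (pvCharA grid p.1 p.2, p))).filter (fun q => pvSymTest q.1)

-- the `while x <= max_x` loop of one row of A (fuel-bounded; fuel = max_x+1 suffices since x grows each step)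
def pvRowLoopA (grid : List String) (maxy maxx y : Int) (fuel : Nat) (x : Int)
    (st : List Int × PySem.Dict (Int × Int) (List Int)) :
    List Int × PySem.Dict (Int × Int) (List Int) :=
  match fuel with
  | 0 => st
  | f + 1 =>
    if decide (x ≤ maxx) then
      if !(PySem.Chars.isdigit (pvCharA grid y x)) then
        pvRowLoopA grid maxy maxx y f (x + 1) st
      else
        let x' := pvNumEnd grid y maxx x (maxx + 1 - x).toNat
        let x1 := x
        let x2 := x' - 1
        let syms := pvGetSymbols grid y x1 x2 maxy maxx
        let st' :=
          if syms.isEmpty then st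
          else
            let v := (PySem.Int.ofStr?
              (PySem.Str.slice (PySem.List.pyGetD grid y "") (some x1) (some (x2 + 1)))).getD 0
            let parts' := st.1 ++ [v]
            let stars := (syms.filter (fun q => q.1 == '*')).map (·.2)
            let gears' := stars.foldl
              (fun g c => g.insert c (g.getD c [] ++ PySem.List.slice parts' (some (-1)) none)) st.2
            (parts', gears')
        pvRowLoopA grid maxy maxx y f x' st'
    else st

def get_parts_and_gears (grid : List String) : List Int × List (List Int) :=
  let maxy : Int := (grid.length : Int) - 1
  let maxx : Int := PySem.Str.len (PySem.List.pyGetD grid 0 "") - 1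
  let st := (PySem.List.pyRange 0 (maxy + 1) 1).foldl
    (fun st y => pvRowLoopA grid maxy maxx y (maxx + 1).toNat 0 st) ([], PySem.Dict.empty)
  (st.1, st.2.values.filter (fun p => p.length == 2))

-- ===== PORT B =====

-- row[x], total form ('.' default; in range under Pre_)
def pvCharB (row : String) (x : Int) : Char := (PySem.Str.pyGet? row x).getD '.'

-- `while x < w and row[x].isdigit(): x += 1`
def pvRunEnd (row : String) (w x : Int) (fuel : Nat) : Int :=
  match fuel with
  | 0 => x
  | f + 1 =>
    if decide (x < w) && PySem.Chars.isdigit (pvCharB row x) then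
      pvRunEnd row w (x + 1) f
    else x

-- the `while x < w` tokenizer loop of _tokenize: collects numbers and symbol cells of one row
def pvTokLoop (row : String) (y w : Int) (fuel : Nat) (x : Int)
    (nums : List (Int × Int × Int × Int)) (syms : List (Int × Char)) :
    List (Int × Int × Int × Int) × List (Int × Char) :=
  match fuel with
  | 0 => (nums, syms)
  | f + 1 =>
    if decide (x < w) then
      if PySem.Chars.isdigit (pvCharB row x) then
        let x' := pvRunEnd row w x (w - x).toNat
        pvTokLoop row y w f x'
          (nums ++ [(y, x, x' - 1,
            (PySem.Int.ofStr? (PySem.Str.slice row (some x) (some x'))).getD 0)]) syms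
      else
        pvTokLoop row y w f (x + 1) nums
          (if pvCharB row x == '.' then syms else syms ++ [(x, pvCharB row x)])
    else (nums, syms)

-- _tokenize(row, y)
def pvTokenize (row : String) (y : Int) : List (Int × Int × Int × Int) × List (Int × Char) :=
  pvTokLoop row y (PySem.Str.len row) (PySem.Str.len row).toNat 0 [] []

-- the inner `for c, ch in sym_rows[r]: if c > x2+1: break; …` join loop
def pvWindowLoop (r x1 x2 val : Int) (syms : List (Int × Char))
    (st : Bool × PySem.Dict (Int × Int) (List Int)) : Bool × PySem.Dict (Int × Int) (List Int) :=
  match syms with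
  | [] => st
  | (c, ch) :: rest =>
    if decide (x2 + 1 < c) then st
    else if decide (x1 - 1 ≤ c) then
      pvWindowLoop r x1 x2 val rest
        (true, if ch == '*' then st.2.insert (r, c) (st.2.getD (r, c) [] ++ [val]) else st.2)
    else pvWindowLoop r x1 x2 val rest st

-- pass 2, one number: join its window against the three relevant symbol rows
def pvProcessB (n : Int) (symRows : List (List (Int × Char)))
    (st : List Int × PySem.Dict (Int × Int) (List Int)) (num : Int × Int × Int × Int) :
    List Int × PySem.Dict (Int × Int) (List Int) :=
  let res := [num.1 - 1, num.1, num.1 + 1].foldl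
    (fun hg r =>
      if decide (0 ≤ r) && decide (r < n) then
        pvWindowLoop r num.2.1 num.2.2.1 num.2.2.2 (PySem.List.pyGetD symRows r []) hg
      else hg) (false, st.2)
  (if res.1 then st.1 ++ [num.2.2.2] else st.1, res.2)

def get_parts_and_gears_alt (grid : List String) : List Int × List (List Int) :=
  let w : Int := PySem.Str.len (PySem.List.pyGetD grid 0 "")
  let tk := (PySem.List.enumerate grid 0).foldl
    (fun (acc : List (Int × Int × Int × Int) × List (List (Int × Char))) p =>
      (acc.1 ++ (pvTokenize (PySem.Str.slice p.2 none (some w)) p.1).1,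
       acc.2 ++ [(pvTokenize (PySem.Str.slice p.2 none (some w)) p.1).2])) ([], [])
  let st := tk.1.foldl (pvProcessB (grid.length : Int) tk.2) ([], PySem.Dict.empty)
  (st.1, st.2.values.filter (fun g => g.length == 2))

-- ===== PRECONDITION & SPEC =====
-- Pre_ excludes exactly the inputs on which the Python A may raise IndexError: the empty grid (grid[0]),
-- and grids with a nonempty first row where some row is shorter than row 0 (the neighbourhood probe may
-- index a row past its end); on some such ragged grids A happens to return — see claim.json "cites".
def Pre_get_parts_and_gears (grid : List String) : Prop :=
  grid ≠ [] ∧ ∀ r ∈ grid, PySem.Str.len (PySem.List.pyGetD grid 0 "") ≤ PySem.Str.len r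
instance (grid : List String) : Decidable (Pre_get_parts_and_gears grid) := by
  unfold Pre_get_parts_and_gears; infer_instance

def pvWitness_get_parts_and_gears : List String := ["617*..", ".....+", "..58.."]

def Spec_get_parts_and_gears (grid : List String) (out : List Int × List (List Int)) : Prop :=
  out = get_parts_and_gears_alt grid
instance (grid : List String) (out : List Int × List (List Int)) :
    Decidable (Spec_get_parts_and_gears grid out) := by
  unfold Spec_get_parts_and_gears; infer_instance

-- ===== CLAIM (what is proved, stated in full; the proofs are below) =====
def Claim_equal_get_parts_and_gears : Prop :=
  ∀ (grid : List String), Dom_get_parts_and_gears grid → Pre_get_parts_and_gears grid →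
    Spec_get_parts_and_gears grid (get_parts_and_gears grid)


-- ===== LEMMAS AND PROOFS =====

-- grid[r][c] through the row string
theorem pv_charAB (grid : List String) (y x : Int) :
    pvCharA grid y x = pvCharB (PySem.List.pyGetD grid y "") x := rfl

-- reading a column < w of the w-truncated row is reading the row
theorem pv_cell_trunc (row : String) (w c : Int) (hw : 0 ≤ w) (_hlen : w ≤ PySem.Str.len row)
    (hc0 : 0 ≤ c) (hcw : c < w) :
    pvCharB (PySem.Str.slice row none (some w)) c = pvCharB row c := by
  unfold pvCharB
  have h1 : (PySem.Str.slice row none (some w)).toList = row.toList.take w.toNat := by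
    simp only [PySem.Str.toList_slice]
    simp only [PySem.Chars.slice_eq_listSlice]
    exact PySem.List.slice_to row.toList hw
  rw [show PySem.Str.pyGet? (PySem.Str.slice row none (some w)) c
      = PySem.List.pyGet? (PySem.Str.slice row none (some w)).toList c by simp,
    show PySem.Str.pyGet? row c = PySem.List.pyGet? row.toList c by simp, h1,
    PySem.List.pyGet?_of_nonneg _ hc0, PySem.List.pyGet?_of_nonneg _ hc0,
    List.getElem?_take_of_lt (by omega)]

-- the truncated row has length w
theorem pv_len_trunc (row : String) (w : Int) (hw : 0 ≤ w) (hlen : w ≤ PySem.Str.len row) :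
    PySem.Str.len (PySem.Str.slice row none (some w)) = w := by
  have h1 : (PySem.Str.slice row none (some w)).toList = row.toList.take w.toNat := by
    simp only [PySem.Str.toList_slice]
    simp only [PySem.Chars.slice_eq_listSlice]
    exact PySem.List.slice_to row.toList hw
  rw [PySem.Str.len_eq, h1, List.length_take]
  rw [PySem.Str.len_eq] at hlen
  omega

theorem pv_runEnd_ge (row : String) (w : Int) (fu : Nat) :
    ∀ x : Int, x ≤ pvRunEnd row w x fu := by
  induction fu with
  | zero => intro x; exact le_refl x
  | succ f ih =>
    intro x
    rw [pvRunEnd]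
    split
    · exact le_trans (by omega) (ih (x + 1))
    · exact le_refl x

theorem pv_runEnd_le (row : String) (w : Int) (fu : Nat) :
    ∀ x : Int, x ≤ w → pvRunEnd row w x fu ≤ w := by
  induction fu with
  | zero => intro x hx; exact hx
  | succ f ih =>
    intro x hx
    rw [pvRunEnd]
    split
    · rename_i h
      rw [Bool.and_eq_true, decide_eq_true_eq] at h
      exact ih (x + 1) (by omega)
    · exact hx

-- pvRunEnd only looks at columns in [x, w)
theorem pv_runEnd_congr (r1 r2 : String) (w : Int) (fu : Nat) :
    ∀ x : Int, (∀ c, x ≤ c → c < w → pvCharB r1 c = pvCharB r2 c) →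
      pvRunEnd r1 w x fu = pvRunEnd r2 w x fu := by
  induction fu with
  | zero => intro x _; rfl
  | succ f ih =>
    intro x hx
    rw [pvRunEnd, pvRunEnd]
    by_cases hxw : x < w
    · rw [hx x (le_refl x) hxw]
      split
      · exact ih (x + 1) (fun c hc hcw => hx c (by omega) hcw)
      · rfl
    · rw [show (decide (x < w)) = false by simpa using hxw]
      simp

-- every column of the run is a digit
theorem pv_runEnd_digits (row : String) (w : Int) (fu : Nat) :
    ∀ x t : Int, x ≤ t → t < pvRunEnd row w x fu →
      PySem.Chars.isdigit (pvCharB row t) = true := by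
  induction fu with
  | zero => intro x t hxt ht; rw [pvRunEnd] at ht; omega
  | succ f ih =>
    intro x t hxt ht
    rw [pvRunEnd] at ht
    split at ht
    · rename_i h
      rw [Bool.and_eq_true, decide_eq_true_eq] at h
      rcases eq_or_lt_of_le hxt with heq | hlt
      · rw [← heq]; exact h.2
      · exact ih (x + 1) t (by omega) ht
    · omega

theorem pv_numEnd_eq_runEnd (grid : List String) (y maxx : Int) (fu : Nat) :
    ∀ x : Int, pvNumEnd grid y maxx x fu
      = pvRunEnd (PySem.List.pyGetD grid y "") (maxx + 1) x fu := by
  induction fu with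
  | zero => intro x; rfl
  | succ f ih =>
    intro x
    show (if decide (x ≤ maxx) && _ then pvNumEnd grid y maxx (x + 1) f else x) = _
    rw [pvRunEnd]
    rw [show (decide (x ≤ maxx)) = (decide (x < maxx + 1)) from decide_eq_decide.mpr (by omega)]
    rw [show pvCharA grid y x = pvCharB (PySem.List.pyGetD grid y "") x from rfl]
    split
    · exact ih (x + 1)
    · rfl

-- the accumulators of the tokenizer loop factor out
theorem pv_tokLoop_acc (row : String) (y w : Int) (fu : Nat) :
    ∀ (x : Int) (ns : List (Int × Int × Int × Int)) (ss : List (Int × Char)),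
      pvTokLoop row y w fu x ns ss
        = (ns ++ (pvTokLoop row y w fu x [] []).1, ss ++ (pvTokLoop row y w fu x [] []).2) := by
  induction fu with
  | zero => intro x ns ss; simp [pvTokLoop]
  | succ f ih =>
    intro x ns ss
    rw [pvTokLoop, pvTokLoop]
    split
    · split
      · rw [ih _ (ns ++ _) ss, ih _ ([] ++ _) []]
        simp
      · by_cases hdot : (pvCharB row x == '.') = true
        · rw [if_pos hdot, if_pos hdot, ih _ ns ss]
        · rw [if_neg hdot, if_neg hdot, ih _ ns (ss ++ _), ih _ ([]) ([] ++ _)]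
          simp
    · simp

-- the number-list component of the tokenizer loop, accumulator factored out
theorem pv_tokNums_push (row : String) (y w : Int) (fu : Nat) (x : Int)
    (ns : List (Int × Int × Int × Int)) (ss : List (Int × Char)) :
    (pvTokLoop row y w fu x ns ss).1 = ns ++ (pvTokLoop row y w fu x [] []).1 := by
  conv_lhs => rw [pv_tokLoop_acc]

-- the symbol list the tokenizer produces, as a filterMap over the columns
theorem pv_tokSyms (row : String) (w : Int) (y : Int) (fu : Nat) :
    ∀ x : Int, (w - x).toNat ≤ fu →
      (pvTokLoop row y w fu x [] []).2
        = (PySem.List.pyRange x w 1).filterMap (fun c =>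
            if pvSymTest (pvCharB row c) then some (c, pvCharB row c) else none) := by
  induction fu with
  | zero =>
    intro x hf
    rw [PySem.List.pyRange_one_eq_nil (by omega)]
    simp [pvTokLoop]
  | succ f ih =>
    intro x hf
    rw [pvTokLoop]
    by_cases hxw : x < w
    · rw [if_pos (by simpa using hxw)]
      by_cases hd : PySem.Chars.isdigit (pvCharB row x) = true
      · rw [if_pos hd]
        have hstep : pvRunEnd row w x (w - x).toNat
            = pvRunEnd row w (x + 1) (w - (x + 1)).toNat := by
          rw [show (w - x).toNat = (w - (x + 1)).toNat + 1 by omega, pvRunEnd,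
            if_pos (by simp [hxw, hd])]
        have hge : x + 1 ≤ pvRunEnd row w x (w - x).toNat := by
          rw [hstep]; exact pv_runEnd_ge row w _ (x + 1)
        have hle : pvRunEnd row w x (w - x).toNat ≤ w :=
          pv_runEnd_le row w _ x (le_of_lt hxw)
        rw [pv_tokLoop_acc]
        show [] ++ (pvTokLoop row y w f (pvRunEnd row w x (w - x).toNat) [] []).2 = _
        rw [List.nil_append, ih _ (by omega)]
        rw [PySem.List.pyRange_one_append x (pvRunEnd row w x (w - x).toNat) w
          (by omega) (by omega), List.filterMap_append]
        have hnil : List.filterMap (fun c =>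
            if pvSymTest (pvCharB row c) = true then some (c, pvCharB row c) else none)
            (PySem.List.pyRange x (pvRunEnd row w x (w - x).toNat) 1) = [] := by
          rw [List.filterMap_eq_nil_iff]
          intro c hc
          have hcb := PySem.List.mem_pyRange_one.mp hc
          have hdc : PySem.Chars.isdigit (pvCharB row c) = true :=
            pv_runEnd_digits row w _ x c hcb.1 hcb.2
          simp [pvSymTest, hdc]
        rw [hnil, List.nil_append]
      · rw [if_neg hd]
        rw [pv_tokLoop_acc, PySem.List.pyRange_one_cons hxw, List.filterMap_cons]
        have hsym : pvSymTest (pvCharB row x) = !(pvCharB row x == '.') := by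
          simp [pvSymTest, hd]
        by_cases hdot : (pvCharB row x == '.') = true
        · rw [if_pos hdot]
          rw [show (if pvSymTest (pvCharB row x) = true then some (x, pvCharB row x) else none)
              = none by rw [hsym, hdot]; rfl]
          show [] ++ (pvTokLoop row y w f (x + 1) [] []).2 = _
          rw [List.nil_append, ih _ (by omega)]
        · rw [if_neg hdot]
          rw [show (if pvSymTest (pvCharB row x) = true then some (x, pvCharB row x) else none)
              = some (x, pvCharB row x) by rw [hsym]; simp [hdot]]
          show ([] ++ [(x, pvCharB row x)]) ++ (pvTokLoop row y w f (x + 1) [] []).2 = _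
          rw [ih _ (by omega)]
          simp
    · rw [if_neg (by simpa using hxw), PySem.List.pyRange_one_eq_nil (by omega)]
      rfl

-- a filterMap over an int range only depends on the support of the function
theorem pv_filterMap_extend {b : Type} (g : Int -> Option b) (a bb A B : Int)
    (hAa : A ≤ a) (hbB : bb ≤ B) (hg : ∀ c : Int, ¬(a ≤ c ∧ c < bb) → g c = none) :
    (PySem.List.pyRange A B 1).filterMap g = (PySem.List.pyRange a bb 1).filterMap g := by
  by_cases hab : a < bb
  · rw [show PySem.List.pyRange A B 1
        = PySem.List.pyRange A a 1 ++ (PySem.List.pyRange a bb 1 ++ PySem.List.pyRange bb B 1) by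
      rw [← PySem.List.pyRange_one_append a bb B (by omega) hbB,
        ← PySem.List.pyRange_one_append A a B hAa (by omega)]]
    rw [List.filterMap_append, List.filterMap_append]
    have h1 : (PySem.List.pyRange A a 1).filterMap g = [] := by
      rw [List.filterMap_eq_nil_iff]
      intro c hc
      exact hg c (by have := PySem.List.mem_pyRange_one.mp hc; omega)
    have h3 : (PySem.List.pyRange bb B 1).filterMap g = [] := by
      rw [List.filterMap_eq_nil_iff]
      intro c hc
      exact hg c (by have := PySem.List.mem_pyRange_one.mp hc; omega)
    rw [h1, h3]
    simp
  · rw [PySem.List.pyRange_one_eq_nil (by omega : bb ≤ a)]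
    rw [List.filterMap_eq_nil_iff.mpr (fun c _ => hg c (by omega))]
    rfl

-- the per-row symbol table of B, over the untruncated grid characters
def pvSymRow (grid : List String) (w r : Int) : List (Int × Char) :=
  (PySem.List.pyRange 0 w 1).filterMap (fun c =>
    if pvSymTest (pvCharA grid r c) then some (c, pvCharA grid r c) else none)

-- the matched (window-restricted) symbols of row r
def pvWin (grid : List String) (w x1 x2 r : Int) : List (Int × Char) :=
  (pvSymRow grid w r).filter (fun p => decide (x1 - 1 ≤ p.1) && decide (p.1 ≤ x2 + 1))

-- the unified per-cell contribution of row r to A's adjacent-symbol list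
def pvH (grid : List String) (w x1 x2 r : Int) (c : Int) : Option (Char × (Int × Int)) :=
  if decide (0 ≤ c) && decide (c < w) && decide (x1 - 1 ≤ c) && decide (c ≤ x2 + 1)
      && pvSymTest (pvCharA grid r c) then some (pvCharA grid r c, (r, c)) else none

-- strings with equal character lists are interchangeable under int()
theorem pv_ofStr_congr (s t : String) (h : s.toList = t.toList) :
    PySem.Int.ofStr? s = PySem.Int.ofStr? t := by
  have hs : PySem.Int.ofStr? s = PySem.Int.ofChars? s.toList :=
    (Option.map_inj_right (fun x y a => a)).mp rfl
  have ht : PySem.Int.ofStr? t = PySem.Int.ofChars? t.toList :=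
    (Option.map_inj_right (fun x y a => a)).mp rfl
  rw [hs, ht, h]

-- slicing a number run out of the w-truncated row reads the same characters
theorem pv_slice_trunc (row : String) (w x1 x2 : Int) (hw : 0 ≤ w) (h1 : 0 ≤ x1) (h2 : x1 ≤ x2)
    (h3 : x2 ≤ w) :
    (PySem.Str.slice (PySem.Str.slice row none (some w)) (some x1) (some x2)).toList
      = (PySem.Str.slice row (some x1) (some x2)).toList := by
  simp only [PySem.Str.toList_slice]
  simp only [PySem.Chars.slice_eq_listSlice]
  rw [PySem.List.slice_to row.toList hw]
  rw [PySem.List.slice_toNat _ h1 (by omega), PySem.List.slice_toNat _ h1 (by omega)]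
  rw [List.drop_take, List.take_take]
  congr 1
  omega

theorem pv_pairwise_symRow (grid : List String) (w r : Int) :
    (pvSymRow grid w r).Pairwise (fun p q => p.1 < q.1) := by
  unfold pvSymRow
  apply List.Pairwise.filterMap _ ?_ (PySem.List.pairwise_lt_pyRange_one 0 w)
  intro a a' hlt b hb b' hb'
  split at hb
  · split at hb'
    · cases hb; cases hb'; simpa
    · cases hb'
  · cases hb

theorem pv_win_filterMap_H (grid : List String) (w x1 x2 r : Int) :
    (pvWin grid w x1 x2 r).map (fun p => (p.2, (r, p.1)))
      = (PySem.List.pyRange 0 w 1).filterMap (pvH grid w x1 x2 r) := by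
  unfold pvWin pvSymRow
  rw [List.filter_filterMap, List.map_filterMap]
  refine List.filterMap_congr ?_
  intro c hc
  have hcb := PySem.List.mem_pyRange_one.mp hc
  unfold pvH
  by_cases hs : pvSymTest (pvCharA grid r c) = true
  · rw [if_pos hs]
    by_cases hwin : (decide (x1 - 1 ≤ c) && decide (c ≤ x2 + 1)) = true
    · rw [show (Option.filter (fun p => decide (x1 - 1 ≤ p.1) && decide (p.1 ≤ x2 + 1))
          (some (c, pvCharA grid r c))) = some (c, pvCharA grid r c) from by
        simp only [Option.filter]
        rw [if_pos hwin]]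
      simp only [Bool.and_eq_true, decide_eq_true_eq] at hwin
      rw [if_pos (show _ = true by
        simp only [Bool.and_eq_true, decide_eq_true_eq]
        refine ⟨⟨⟨⟨hcb.1, hcb.2⟩, by omega⟩, by omega⟩, hs⟩)]
      rfl
    · rw [show (Option.filter (fun p => decide (x1 - 1 ≤ p.1) && decide (p.1 ≤ x2 + 1))
          (some (c, pvCharA grid r c))) = none from by
        simp only [Option.filter]
        rw [if_neg hwin]]
      rw [if_neg (by
        simp only [Bool.and_eq_true, decide_eq_true_eq] at hwin ⊢
        tauto)]
      rfl
  · rw [if_neg hs, if_neg (by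
      simp only [Bool.and_eq_true, decide_eq_true_eq] at hs ⊢
      tauto)]
    rfl

-- one row's contribution to get_symbols, as a filterMap
theorem pv_coords_filterMap (grid : List String) (L w r : Int) (l : List Int) :
    ((((l.map (fun xx => (r, xx))).filter
        (fun p => decide (0 ≤ p.1) && decide (p.1 ≤ L - 1) && decide (0 ≤ p.2)
          && decide (p.2 ≤ w - 1))).map (fun p => (pvCharA grid p.1 p.2, p))).filter
        (fun q => pvSymTest q.1))
      = if decide (0 ≤ r) && decide (r < L) then
          l.filterMap (fun c =>
            if decide (0 ≤ c) && decide (c < w) && pvSymTest (pvCharA grid r c)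
            then some (pvCharA grid r c, (r, c)) else none)
        else [] := by
  by_cases hr : (decide (0 ≤ r) && decide (r < L)) = true
  · rw [if_pos hr]
    rw [Bool.and_eq_true, decide_eq_true_eq, decide_eq_true_eq] at hr
    induction l with
    | nil => rfl
    | cons c t ih =>
      rw [List.map_cons, List.filter_cons, List.filterMap_cons]
      by_cases hcb : (0 ≤ c ∧ c < w)
      · rw [if_pos (show (decide (0 ≤ r) && decide (r ≤ L - 1) && decide (0 ≤ c)
            && decide (c ≤ w - 1)) = true by
          simp only [Bool.and_eq_true, decide_eq_true_eq]
          omega)]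
        rw [List.map_cons, List.filter_cons]
        by_cases hs : pvSymTest (pvCharA grid r c) = true
        · simp only [hs, Bool.and_true, if_true,
            show (decide (0 ≤ c) && decide (c < w)) = true by
              simp only [Bool.and_eq_true, decide_eq_true_eq]; exact ⟨hcb.1, hcb.2⟩]
          rw [ih]
        · rw [Bool.not_eq_true] at hs
          simp only [hs, Bool.and_false, Bool.false_eq_true, if_false]
          rw [ih]
      · rw [if_neg (show ¬ (decide (0 ≤ r) && decide (r ≤ L - 1) && decide (0 ≤ c)
            && decide (c ≤ w - 1)) = true by
          simp only [Bool.and_eq_true, decide_eq_true_eq]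
          omega)]
        simp only [show (decide (0 ≤ c) && decide (c < w)) = false by
            simp only [Bool.and_eq_false_iff, decide_eq_false_iff_not]; tauto,
          Bool.false_and, Bool.false_eq_true, if_false]
        exact ih
  · rw [if_neg hr]
    have hnil : (l.map (fun xx => (r, xx))).filter
        (fun p => decide (0 ≤ p.1) && decide (p.1 ≤ L - 1) && decide (0 ≤ p.2)
          && decide (p.2 ≤ w - 1)) = [] := by
      rw [List.filter_eq_nil_iff]
      intro p hp
      rw [List.mem_map] at hp
      obtain ⟨xx, _, rfl⟩ := hp
      simp only [Bool.and_eq_true, decide_eq_true_eq] at hr ⊢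
      rintro ⟨⟨⟨h1, h2⟩, h3⟩, h4⟩
      exact hr ⟨h1, by omega⟩
    rw [hnil]
    rfl

theorem pv_row_filter_eq (y x1 x2 yy : Int) (hne : yy ≠ y) :
    (PySem.List.pyRange (x1 - 1) (x2 + 2) 1).filter (fun xx =>
      !(((PySem.List.pyRange x1 (x2 + 1) 1).map (fun x => (y, x))).contains (yy, xx)))
    = PySem.List.pyRange (x1 - 1) (x2 + 2) 1 := by
  rw [List.filter_eq_self]
  intro a _
  simp only [List.contains_eq_mem, Bool.not_eq_true', decide_eq_false_iff_not, List.mem_map]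
  rintro ⟨x, -, hx⟩
  exact hne ((Prod.mk.injEq _ _ _ _).mp hx).1.symm

theorem pv_mid_filter_eq (y x1 x2 : Int) (h : x1 ≤ x2) :
    (PySem.List.pyRange (x1 - 1) (x2 + 2) 1).filter (fun xx =>
      !(((PySem.List.pyRange x1 (x2 + 1) 1).map (fun x => (y, x))).contains (y, xx)))
    = [x1 - 1, x2 + 1] := by
  have hmem : ∀ xx : Int, ((y, xx) ∈ (PySem.List.pyRange x1 (x2 + 1) 1).map (fun x => (y, x)))
      ↔ (x1 ≤ xx ∧ xx < x2 + 1) := by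
    intro xx
    rw [List.mem_map]
    constructor
    · rintro ⟨x, hx, hxx⟩
      have h2 : x = xx := ((Prod.mk.injEq _ _ _ _).mp hxx).2
      subst h2
      exact PySem.List.mem_pyRange_one.mp hx
    · intro hb
      exact ⟨xx, PySem.List.mem_pyRange_one.mpr hb, rfl⟩
  have hsplit : PySem.List.pyRange (x1 - 1) (x2 + 2) 1
      = (x1 - 1) :: (PySem.List.pyRange x1 (x2 + 1) 1 ++ [x2 + 1]) := by
    rw [PySem.List.pyRange_one_cons (by omega)]
    congr 1
    rw [show x1 - 1 + 1 = x1 by ring, show x2 + 2 = (x2 + 1) + 1 by ring,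
      PySem.List.pyRange_one_succ_right (by omega)]
  rw [hsplit]
  rw [List.filter_cons_of_pos (by
    simp only [List.contains_eq_mem, Bool.not_eq_true', decide_eq_false_iff_not, hmem]
    omega)]
  rw [List.filter_append]
  rw [List.filter_eq_nil_iff.mpr (by
    intro a ha
    have hb := PySem.List.mem_pyRange_one.mp ha
    simp only [List.contains_eq_mem, Bool.not_eq_true', decide_eq_false_iff_not, hmem]
    omega)]
  rw [List.filter_cons_of_pos (by
    simp only [List.contains_eq_mem, Bool.not_eq_true', decide_eq_false_iff_not, hmem]
    omega)]
  rfl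

theorem pv_flatMap_if_filter {a b : Type} (l : List a) (p : a → Bool) (f : a → List b) :
    l.flatMap (fun x => if p x then f x else []) = (l.filter p).flatMap f := by
  induction l with
  | nil => rfl
  | cons x t ih =>
    rw [List.flatMap_cons, List.filter_cons]
    by_cases hp : p x = true
    · rw [if_pos hp, if_pos hp, List.flatMap_cons, ih]
    · rw [if_neg hp, if_neg hp, ih]
      simp

-- A's adjacent coordinates, row by row
theorem pv_adjacent_rows (y x1 x2 : Int) (h : x1 ≤ x2) :
    pvAdjacent y x1 x2
      = (PySem.List.pyRange (x1 - 1) (x2 + 2) 1).map (fun xx => (y - 1, xx))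
        ++ [(y, x1 - 1), (y, x2 + 1)]
        ++ (PySem.List.pyRange (x1 - 1) (x2 + 2) 1).map (fun xx => (y + 1, xx)) := by
  unfold pvAdjacent
  have h3 : PySem.List.pyRange (y - 1) (y + 2) 1 = [y - 1, y, y + 1] := by
    rw [PySem.List.pyRange_one_cons (by omega), PySem.List.pyRange_one_cons (by omega),
      PySem.List.pyRange_one_cons (by omega), PySem.List.pyRange_one_eq_nil (by omega)]
    norm_num
  rw [h3, List.flatMap_cons, List.flatMap_cons, List.flatMap_cons, List.flatMap_nil]
  rw [pv_row_filter_eq y x1 x2 (y - 1) (by omega), pv_mid_filter_eq y x1 x2 h,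
    pv_row_filter_eq y x1 x2 (y + 1) (by omega)]
  simp

-- get_symbols is the window join against the three relevant symbol rows
theorem pv_getSymbols_rows (grid : List String) (w x1 x2 y : Int)
    (hx : x1 ≤ x2) (hx0 : 0 ≤ x1) (hxw : x2 < w)
    (hdig : ∀ t : Int, x1 ≤ t → t ≤ x2 → PySem.Chars.isdigit (pvCharA grid y t) = true) :
    pvGetSymbols grid y x1 x2 ((grid.length : Int) - 1) (w - 1)
      = ([y - 1, y, y + 1].filter
          (fun r => decide (0 ≤ r) && decide (r < (grid.length : Int)))).flatMap
          (fun r => (pvWin grid w x1 x2 r).map (fun p => (p.2, (r, p.1)))) := by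
  have hseg : ∀ r : Int,
      (PySem.List.pyRange (x1 - 1) (x2 + 2) 1).filterMap (fun c =>
        if decide (0 ≤ c) && decide (c < w) && pvSymTest (pvCharA grid r c)
        then some (pvCharA grid r c, (r, c)) else none)
      = (pvWin grid w x1 x2 r).map (fun p => (p.2, (r, p.1))) := by
    intro r
    rw [pv_win_filterMap_H]
    have hsupp : ∀ c : Int, ¬((x1 - 1) ≤ c ∧ c < x2 + 2) → pvH grid w x1 x2 r c = none := by
      intro c hc
      unfold pvH
      rw [if_neg]
      simp only [Bool.and_eq_true, decide_eq_true_eq]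
      rintro ⟨⟨⟨⟨-, -⟩, h3⟩, h4⟩, -⟩
      exact hc ⟨h3, by omega⟩
    have hsupp2 : ∀ c : Int, ¬(0 ≤ c ∧ c < w) → pvH grid w x1 x2 r c = none := by
      intro c hc
      unfold pvH
      rw [if_neg]
      simp only [Bool.and_eq_true, decide_eq_true_eq]
      tauto
    calc (PySem.List.pyRange (x1 - 1) (x2 + 2) 1).filterMap (fun c =>
          if decide (0 ≤ c) && decide (c < w) && pvSymTest (pvCharA grid r c)
          then some (pvCharA grid r c, (r, c)) else none)
        = (PySem.List.pyRange (x1 - 1) (x2 + 2) 1).filterMap (pvH grid w x1 x2 r) := by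
          refine List.filterMap_congr ?_
          intro c hc
          have hcb := PySem.List.mem_pyRange_one.mp hc
          unfold pvH
          rw [show decide (x1 - 1 ≤ c) = true by simp only [decide_eq_true_eq]; omega,
            show decide (c ≤ x2 + 1) = true by simp only [decide_eq_true_eq]; omega]
          simp only [Bool.and_true]
      _ = (PySem.List.pyRange (min 0 (x1 - 1)) (max w (x2 + 2)) 1).filterMap
            (pvH grid w x1 x2 r) :=
          (pv_filterMap_extend (pvH grid w x1 x2 r) (x1 - 1) (x2 + 2) _ _
            (by omega) (by omega) hsupp).symm
      _ = (PySem.List.pyRange 0 w 1).filterMap (pvH grid w x1 x2 r) :=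
          pv_filterMap_extend (pvH grid w x1 x2 r) 0 w _ _ (by omega) (by omega) hsupp2
  simp only [pvGetSymbols]
  rw [pv_adjacent_rows y x1 x2 hx]
  rw [List.filter_append, List.filter_append, List.map_append, List.map_append,
    List.filter_append, List.filter_append]
  rw [show ([((y : Int), x1 - 1), (y, x2 + 1)]) = [x1 - 1, x2 + 1].map (fun xx => (y, xx)) from rfl]
  rw [pv_coords_filterMap grid (grid.length : Int) w (y - 1),
    pv_coords_filterMap grid (grid.length : Int) w y,
    pv_coords_filterMap grid (grid.length : Int) w (y + 1)]
  rw [← pv_flatMap_if_filter]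
  rw [List.flatMap_cons, List.flatMap_cons, List.flatMap_cons, List.flatMap_nil,
    List.append_nil]
  have hmid : ([x1 - 1, x2 + 1] : List Int).filterMap (fun c =>
        if decide (0 ≤ c) && decide (c < w) && pvSymTest (pvCharA grid y c)
        then some (pvCharA grid y c, (y, c)) else none)
      = (PySem.List.pyRange (x1 - 1) (x2 + 2) 1).filterMap (fun c =>
        if decide (0 ≤ c) && decide (c < w) && pvSymTest (pvCharA grid y c)
        then some (pvCharA grid y c, (y, c)) else none) := by
    rw [show PySem.List.pyRange (x1 - 1) (x2 + 2) 1
        = [x1 - 1] ++ (PySem.List.pyRange x1 (x2 + 1) 1 ++ [x2 + 1]) from by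
      rw [PySem.List.pyRange_one_cons (by omega : x1 - 1 < x2 + 2)]
      rw [show x1 - 1 + 1 = x1 by ring, show x2 + 2 = (x2 + 1) + 1 by ring,
        PySem.List.pyRange_one_succ_right (by omega)]
      rfl]
    rw [List.filterMap_append, List.filterMap_append]
    have hz : (PySem.List.pyRange x1 (x2 + 1) 1).filterMap (fun c =>
        if decide (0 ≤ c) && decide (c < w) && pvSymTest (pvCharA grid y c)
        then some (pvCharA grid y c, (y, c)) else none) = [] := by
      rw [List.filterMap_eq_nil_iff]
      intro c hc
      have hcb := PySem.List.mem_pyRange_one.mp hc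
      have hd : PySem.Chars.isdigit (pvCharA grid y c) = true := hdig c hcb.1 (by omega)
      rw [if_neg]
      simp only [Bool.and_eq_true]
      rintro ⟨-, hsymc⟩
      simp [pvSymTest, hd] at hsymc
    rw [hz]
    rw [show ([x1 - 1, x2 + 1] : List Int) = [x1 - 1] ++ [x2 + 1] from rfl,
      List.filterMap_append, List.nil_append]
  rw [hmid]
  rw [hseg (y - 1), hseg y, hseg (y + 1)]
  exact List.append_assoc _ _ _

-- the break-loop against a sorted symbol list is a fold over the window filter
theorem pv_window_eq (r x1 x2 v : Int) (syms : List (Int × Char))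
    (hs : syms.Pairwise (fun p q => p.1 < q.1)) :
    ∀ st : Bool × PySem.Dict (Int × Int) (List Int),
      pvWindowLoop r x1 x2 v syms st
        = (st.1 || !((syms.filter
              (fun p => decide (x1 - 1 ≤ p.1) && decide (p.1 ≤ x2 + 1))).isEmpty),
           (syms.filter (fun p => decide (x1 - 1 ≤ p.1) && decide (p.1 ≤ x2 + 1))).foldl
             (fun g p => if p.2 == '*' then g.insert (r, p.1) (g.getD (r, p.1) [] ++ [v]) else g)
             st.2) := by
  induction syms with
  | nil => intro st; simp [pvWindowLoop]
  | cons p rest ih =>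
    obtain ⟨c, ch⟩ := p
    rw [List.pairwise_cons] at hs
    intro st
    rw [pvWindowLoop, List.filter_cons]
    by_cases h1 : x2 + 1 < c
    · rw [if_pos (by simpa using h1)]
      have hwf : (decide (x1 - 1 ≤ ((c, ch) : Int × Char).1)
          && decide (((c, ch) : Int × Char).1 ≤ x2 + 1)) = false := by
        simp only [Bool.and_eq_false_iff, decide_eq_false_iff_not]
        right; omega
      simp only [hwf, Bool.false_eq_true, if_false]
      have hrest : rest.filter
          (fun p => decide (x1 - 1 ≤ p.1) && decide (p.1 ≤ x2 + 1)) = [] := by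
        rw [List.filter_eq_nil_iff]
        intro q hq
        have hcq := hs.1 q hq
        simp only [Bool.and_eq_true, decide_eq_true_eq]
        omega
      rw [hrest]
      simp
    · rw [if_neg (by simpa using h1)]
      by_cases h2 : x1 - 1 ≤ c
      · rw [if_pos (by simpa using h2)]
        rw [ih hs.2]
        have hwt : (decide (x1 - 1 ≤ ((c, ch) : Int × Char).1)
            && decide (((c, ch) : Int × Char).1 ≤ x2 + 1)) = true := by
          simp only [Bool.and_eq_true, decide_eq_true_eq]
          omega
        simp only [hwt, if_true]
        rw [List.foldl_cons]
        simp
      · rw [if_neg (by simpa using h2)]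
        rw [ih hs.2]
        have hwf : (decide (x1 - 1 ≤ ((c, ch) : Int × Char).1)
            && decide (((c, ch) : Int × Char).1 ≤ x2 + 1)) = false := by
          simp only [Bool.and_eq_false_iff, decide_eq_false_iff_not]
          left; omega
        simp only [hwf, Bool.false_eq_true, if_false]

-- the star-only update fold, rephrased over the star coordinates
theorem pv_updFold (r v : Int) (l : List (Int × Char)) :
    ∀ g0 : PySem.Dict (Int × Int) (List Int),
      l.foldl (fun g p => if p.2 == '*' then g.insert (r, p.1) (g.getD (r, p.1) [] ++ [v]) else g) g0
        = (((l.filter (fun p => p.2 == '*')).map (fun p => ((r, p.1) : Int × Int))).foldl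
            (fun g c => g.insert c (g.getD c [] ++ [v])) g0) := by
  induction l with
  | nil => intro g0; rfl
  | cons p t ih =>
    intro g0
    rw [List.foldl_cons, List.filter_cons]
    by_cases hp : (p.2 == '*') = true
    · rw [if_pos hp]
      simp only [hp, if_true]
      rw [ih]
      rfl
    · rw [if_neg hp]
      simp only [hp]
      exact ih g0

theorem pv_slice_last (xs : List Int) (v : Int) :
    PySem.List.slice (xs ++ [v]) (some (-1)) none = [v] := by
  rw [PySem.List.slice_from_neg_one]
  simp

-- the three-row fold of pvProcessB, rolled out over the in-bounds rows
theorem pv_rows_fold (grid : List String) (w x1 x2 v : Int) :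
    ∀ (R : List Int) (b : Bool) (g : PySem.Dict (Int × Int) (List Int)),
      R.foldl (fun hg r =>
          (hg.1 || !((pvWin grid w x1 x2 r).isEmpty),
           (pvWin grid w x1 x2 r).foldl
             (fun g p => if p.2 == '*' then g.insert (r, p.1) (g.getD (r, p.1) [] ++ [v]) else g)
             hg.2)) (b, g)
        = (b || !((R.flatMap (fun r => (pvWin grid w x1 x2 r).map (fun p => (p.2, (r, p.1))))).isEmpty),
           ((R.flatMap (fun r => ((pvWin grid w x1 x2 r).filter (fun p => p.2 == '*')).map
              (fun p => ((r, p.1) : Int × Int)))).foldl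
             (fun g c => g.insert c (g.getD c [] ++ [v])) g)) := by
  intro R
  induction R with
  | nil => intro b g; simp
  | cons r R ih =>
    intro b g
    rw [List.foldl_cons, ih, List.flatMap_cons, List.flatMap_cons]
    rw [pv_updFold]
    simp only [Prod.mk.injEq]
    constructor
    · cases pvWin grid w x1 x2 r <;> cases b <;> simp
    · rw [List.foldl_append]

-- the star entries of the joined symbol list, row by row
theorem pv_stars_flat (grid : List String) (w x1 x2 : Int) :
    ∀ R : List Int,
      ((R.flatMap (fun r => (pvWin grid w x1 x2 r).map (fun p => (p.2, (r, p.1))))).filter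
          (fun q => q.1 == '*')).map (fun q => q.2)
        = R.flatMap (fun r => ((pvWin grid w x1 x2 r).filter (fun p => p.2 == '*')).map
            (fun p => ((r, p.1) : Int × Int))) := by
  intro R
  induction R with
  | nil => rfl
  | cons r t ih =>
    rw [List.flatMap_cons, List.flatMap_cons, List.filter_append, List.map_append, ih]
    congr 1
    rw [List.filter_map, List.map_map]
    rfl

-- A's per-number body equals B's join step
theorem pv_stepB_eq (grid : List String) (symRows : List (List (Int × Char))) (w y x1 x2 v : Int)
    (_hy0 : 0 ≤ y) (_hyL : y < (grid.length : Int))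
    (hx : x1 ≤ x2) (hx0 : 0 ≤ x1) (hxw : x2 < w)
    (hdig : ∀ t : Int, x1 ≤ t → t ≤ x2 → PySem.Chars.isdigit (pvCharA grid y t) = true)
    (hsym : ∀ r : Int, 0 ≤ r → r < (grid.length : Int) →
      PySem.List.pyGetD symRows r [] = pvSymRow grid w r)
    (st : List Int × PySem.Dict (Int × Int) (List Int)) :
    (if (pvGetSymbols grid y x1 x2 ((grid.length : Int) - 1) (w - 1)).isEmpty then st
     else
       (st.1 ++ [v],
        (((pvGetSymbols grid y x1 x2 ((grid.length : Int) - 1) (w - 1)).filter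
            (fun q => q.1 == '*')).map (fun q => q.2)).foldl
          (fun g c => g.insert c (g.getD c []
            ++ PySem.List.slice (st.1 ++ [v]) (some (-1)) none)) st.2))
      = pvProcessB (grid.length : Int) symRows st (y, x1, x2, v) := by
  have hR : ∀ r : Int, r ∈ ([y - 1, y, y + 1].filter
      (fun r => decide (0 ≤ r) && decide (r < (grid.length : Int)))) →
      0 ≤ r ∧ r < (grid.length : Int) := by
    intro r hr
    have := (List.mem_filter.mp hr).2
    simpa using this
  rw [pv_getSymbols_rows grid w x1 x2 y hx hx0 hxw hdig]
  show _ = (if _ then st.1 ++ [(y, x1, x2, v).2.2.2] else st.1, _)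
  rw [← List.foldl_filter]
  rw [PySem.List.foldl_congr_mem ([y - 1, y, y + 1].filter
      (fun r => decide (0 ≤ r) && decide (r < (grid.length : Int))))
    (fun hg r => pvWindowLoop r x1 x2 v (PySem.List.pyGetD symRows r []) hg)
    (fun hg r => (hg.1 || !((pvWin grid w x1 x2 r).isEmpty),
      (pvWin grid w x1 x2 r).foldl
        (fun g p => if p.2 == '*' then g.insert (r, p.1) (g.getD (r, p.1) [] ++ [v]) else g)
        hg.2))
    (false, st.2)
    (fun hg r hr => by
      show pvWindowLoop r x1 x2 v (PySem.List.pyGetD symRows r []) hg = _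
      rw [hsym r (hR r hr).1 (hR r hr).2]
      exact pv_window_eq r x1 x2 v (pvSymRow grid w r) (pv_pairwise_symRow grid w r) hg)]
  rw [pv_rows_fold grid w x1 x2 v]
  by_cases hE : (([y - 1, y, y + 1].filter
      (fun r => decide (0 ≤ r) && decide (r < (grid.length : Int)))).flatMap
      (fun r => (pvWin grid w x1 x2 r).map (fun p => (p.2, (r, p.1))))).isEmpty = true
  · rw [if_pos hE]
    have hall := List.flatMap_eq_nil_iff.mp (List.isEmpty_iff.mp hE)
    have hstars : ([y - 1, y, y + 1].filter
        (fun r => decide (0 ≤ r) && decide (r < (grid.length : Int)))).flatMap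
        (fun r => ((pvWin grid w x1 x2 r).filter (fun p => p.2 == '*')).map
          (fun p => ((r, p.1) : Int × Int))) = [] := by
      rw [List.flatMap_eq_nil_iff]
      intro r hr
      have he : pvWin grid w x1 x2 r = [] := List.map_eq_nil_iff.mp (hall _ hr)
      rw [he]
      rfl
    rw [hE, hstars]
    simp
  · rw [if_neg hE]
    rw [Bool.not_eq_true] at hE
    rw [hE]
    simp only [pv_slice_last, Bool.false_or, Bool.not_false, if_true]
    rw [pv_stars_flat]

-- one row of A's scan is the fold of the join step over that row's tokenized numbers
theorem pv_rowLoop_eq (grid : List String) (symRows : List (List (Int × Char))) (w y : Int)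
    (hy0 : 0 ≤ y) (hyL : y < (grid.length : Int)) (hw0 : 0 ≤ w)
    (hcell : ∀ c : Int, 0 ≤ c → c < w →
      pvCharB (PySem.Str.slice (PySem.List.pyGetD grid y "") none (some w)) c = pvCharA grid y c)
    (hsym : ∀ r : Int, 0 ≤ r → r < (grid.length : Int) →
      PySem.List.pyGetD symRows r [] = pvSymRow grid w r)
    (fu : Nat) :
    ∀ (x : Int) (st : List Int × PySem.Dict (Int × Int) (List Int)), 0 ≤ x → (w - x).toNat ≤ fu →
      pvRowLoopA grid ((grid.length : Int) - 1) (w - 1) y fu x st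
        = ((pvTokLoop (PySem.Str.slice (PySem.List.pyGetD grid y "") none (some w)) y w fu x [] []).1).foldl
            (pvProcessB (grid.length : Int) symRows) st := by
  induction fu with
  | zero => intro x st _ _; simp [pvRowLoopA, pvTokLoop]
  | succ f ih =>
    intro x st hx0 hfu
    rw [pvRowLoopA, pvTokLoop]
    rw [show (decide (x ≤ w - 1)) = (decide (x < w)) from decide_eq_decide.mpr (by omega)]
    by_cases hxw : x < w
    · have hxT : (decide (x < w)) = true := by simpa using hxw
      rw [if_pos hxT, if_pos hxT]
      have hcx : pvCharB (PySem.Str.slice (PySem.List.pyGetD grid y "") none (some w)) x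
          = pvCharA grid y x := hcell x hx0 hxw
      by_cases hd : PySem.Chars.isdigit (pvCharA grid y x) = true
      · rw [if_neg (show ¬ ((!(PySem.Chars.isdigit (pvCharA grid y x))) = true) by simp [hd])]
        rw [if_pos (show PySem.Chars.isdigit
            (pvCharB (PySem.Str.slice (PySem.List.pyGetD grid y "") none (some w)) x) = true
          by rw [hcx]; exact hd)]
        have hcongr : ∀ c : Int, x ≤ c → c < w →
            pvCharB (PySem.Str.slice (PySem.List.pyGetD grid y "") none (some w)) c
              = pvCharB (PySem.List.pyGetD grid y "") c := by
          intro c hc hcw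
          rw [hcell c (by omega) hcw, pv_charAB]
        have hrun : pvRunEnd (PySem.Str.slice (PySem.List.pyGetD grid y "") none (some w))
              w x (w - x).toNat
            = pvNumEnd grid y (w - 1) x (w - 1 + 1 - x).toNat := by
          rw [show w - 1 + 1 - x = w - x by ring, pv_numEnd_eq_runEnd,
            show w - 1 + 1 = w by ring]
          exact pv_runEnd_congr _ _ w _ x hcongr
        rw [hrun]
        have hge : x + 1 ≤ pvNumEnd grid y (w - 1) x (w - 1 + 1 - x).toNat := by
          rw [← hrun, show (w - x).toNat = (w - (x + 1)).toNat + 1 by omega, pvRunEnd,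
            if_pos (by simp only [Bool.and_eq_true, decide_eq_true_eq]; exact ⟨hxw, by rw [hcx]; exact hd⟩)]
          exact pv_runEnd_ge _ _ _ (x + 1)
        have hle : pvNumEnd grid y (w - 1) x (w - 1 + 1 - x).toNat ≤ w := by
          rw [← hrun]
          exact pv_runEnd_le _ _ _ x (le_of_lt hxw)
        have hdigits : ∀ t : Int, x ≤ t → t ≤ pvNumEnd grid y (w - 1) x (w - 1 + 1 - x).toNat - 1 →
            PySem.Chars.isdigit (pvCharA grid y t) = true := by
          intro t ht1 ht2
          rw [← hcell t (by omega) (by omega)]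
          exact pv_runEnd_digits _ w _ x t ht1 (by rw [hrun]; omega)
        have hval : ((PySem.Int.ofStr? (PySem.Str.slice (PySem.List.pyGetD grid y "")
              (some x) (some (pvNumEnd grid y (w - 1) x (w - 1 + 1 - x).toNat - 1 + 1)))).getD 0)
            = ((PySem.Int.ofStr? (PySem.Str.slice
                (PySem.Str.slice (PySem.List.pyGetD grid y "") none (some w))
                (some x) (some (pvNumEnd grid y (w - 1) x (w - 1 + 1 - x).toNat)))).getD 0) := by
          rw [show pvNumEnd grid y (w - 1) x (w - 1 + 1 - x).toNat - 1 + 1 = pvNumEnd grid y (w - 1) x (w - 1 + 1 - x).toNat by ring]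
          rw [pv_ofStr_congr _ _ (pv_slice_trunc (PySem.List.pyGetD grid y "") w x (pvNumEnd grid y (w - 1) x (w - 1 + 1 - x).toNat)
            hw0 hx0 (by omega) hle)]
        dsimp only
        rw [pv_stepB_eq grid symRows w y x (pvNumEnd grid y (w - 1) x (w - 1 + 1 - x).toNat - 1)
          ((PySem.Int.ofStr? (PySem.Str.slice (PySem.List.pyGetD grid y "")
            (some x) (some (pvNumEnd grid y (w - 1) x (w - 1 + 1 - x).toNat - 1 + 1)))).getD 0)
          hy0 hyL (by omega) hx0 (by omega) hdigits hsym st]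
        rw [pv_tokNums_push _ _ _ f (pvNumEnd grid y (w - 1) x (w - 1 + 1 - x).toNat) ([] ++ [(y, x, pvNumEnd grid y (w - 1) x (w - 1 + 1 - x).toNat - 1,
            (PySem.Int.ofStr? (PySem.Str.slice
              (PySem.Str.slice (PySem.List.pyGetD grid y "") none (some w))
              (some x) (some (pvNumEnd grid y (w - 1) x (w - 1 + 1 - x).toNat)))).getD 0)]) []]
        rw [List.nil_append, List.singleton_append, List.foldl_cons]
        rw [ih (pvNumEnd grid y (w - 1) x (w - 1 + 1 - x).toNat) _ (by omega) (by omega), hval]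
      · rw [if_pos (show (!(PySem.Chars.isdigit (pvCharA grid y x))) = true by simp [hd])]
        rw [if_neg (show ¬ (PySem.Chars.isdigit
            (pvCharB (PySem.Str.slice (PySem.List.pyGetD grid y "") none (some w)) x) = true)
          by rw [hcx]; exact hd)]
        rw [pv_tokNums_push _ _ _ f (x + 1) []
          (if (pvCharB (PySem.Str.slice (PySem.List.pyGetD grid y "") none (some w)) x == '.') = true
           then [] else [] ++ [(x, pvCharB (PySem.Str.slice (PySem.List.pyGetD grid y "") none (some w)) x)])]
        rw [List.nil_append]
        exact ih (x + 1) st (by omega) (by omega)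
    · have hxF : ¬ ((decide (x < w)) = true) := by simpa using hxw
      rw [if_neg hxF, if_neg hxF]
      rfl

-- the pass-1 fold of B, with both accumulators factored out
theorem pv_foldPair {p : Type} {b c : Type} (g1 : p -> List b) (g2 : p -> c) :
    ∀ (l : List p) (a1 : List b) (a2 : List c),
      l.foldl (fun acc q => (acc.1 ++ g1 q, acc.2 ++ [g2 q])) (a1, a2)
        = (a1 ++ l.flatMap g1, a2 ++ l.map g2) := by
  intro l
  induction l with
  | nil => intro a1 a2; simp
  | cons q t ih =>
    intro a1 a2
    rw [List.foldl_cons, ih, List.flatMap_cons, List.map_cons]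
    simp

theorem pv_ports_eq (grid : List String) (hpre : Pre_get_parts_and_gears grid) :
    get_parts_and_gears grid = get_parts_and_gears_alt grid := by
  obtain ⟨hne, hlen⟩ := hpre
  have hw0 : 0 ≤ PySem.Str.len (PySem.List.pyGetD grid 0 "") := by
    rw [PySem.Str.len_eq]
    exact Int.natCast_nonneg _
  simp only [get_parts_and_gears, get_parts_and_gears_alt]

  set w := PySem.Str.len (PySem.List.pyGetD grid 0 "") with hwdef
  have hlen' : ∀ y : Int, 0 ≤ y → y < (grid.length : Int) →
      w ≤ PySem.Str.len (PySem.List.pyGetD grid y "") := by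
    intro y h0 hL
    rw [PySem.List.pyGetD_eq_getElem grid "" h0 (by omega)]
    exact hlen _ (List.getElem_mem _)
  have hcell' : ∀ y : Int, 0 ≤ y → y < (grid.length : Int) → ∀ c : Int, 0 ≤ c → c < w →
      pvCharB (PySem.Str.slice (PySem.List.pyGetD grid y "") none (some w)) c
        = pvCharA grid y c := by
    intro y h0 hL c hc0 hcw
    rw [pv_cell_trunc _ _ _ hw0 (hlen' y h0 hL) hc0 hcw, pv_charAB]
  rw [pv_foldPair
      (fun p : Int × String => (pvTokenize (PySem.Str.slice p.2 none (some w)) p.1).1)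
      (fun p : Int × String => (pvTokenize (PySem.Str.slice p.2 none (some w)) p.1).2)
      (PySem.List.enumerate grid 0) [] []]
  have hsym : ∀ r : Int, 0 ≤ r → r < (grid.length : Int) →
      PySem.List.pyGetD ((PySem.List.enumerate grid 0).map (fun p =>
        (pvTokenize (PySem.Str.slice p.2 none (some w)) p.1).2)) r [] = pvSymRow grid w r := by
    intro r h0 hL
    rw [PySem.List.pyGetD_eq_getElem _ [] h0
      (by rw [List.length_map, PySem.List.length_enumerate]; omega)]
    rw [List.getElem_map, PySem.List.getElem_enumerate]
    have hrow : PySem.List.pyGetD grid r "" = grid[r.toNat]'(by omega) := by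
      rw [PySem.List.pyGetD_eq_getElem grid "" h0 (by omega)]
    have hr2 : (0 + (r.toNat : Int)) = r := by omega
    have hlenr : PySem.Str.len (PySem.Str.slice (grid[r.toNat]'(by omega)) none (some w)) = w := by
      rw [pv_len_trunc _ _ hw0]
      rw [← hrow]
      exact hlen' r h0 hL
    show (pvTokenize (PySem.Str.slice (grid[r.toNat]'(by omega)) none (some w)) (0 + (r.toNat : Int))).2 = _
    unfold pvTokenize
    rw [hlenr]
    rw [pv_tokSyms _ w _ w.toNat 0 (by omega)]
    refine List.filterMap_congr ?_
    intro c hc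
    have hcb := PySem.List.mem_pyRange_one.mp hc
    rw [show pvCharB (PySem.Str.slice (grid[r.toNat]'(by omega)) none (some w)) c
        = pvCharA grid r c from by rw [← hrow]; exact hcell' r h0 hL c hcb.1 hcb.2]
  rw [show (grid.length : Int) - 1 + 1 = (grid.length : Int) by ring]
  rw [show w - 1 + 1 = w by ring]
  rw [PySem.List.foldl_congr_mem (PySem.List.pyRange 0 (grid.length : Int) 1)
    (fun st y => pvRowLoopA grid ((grid.length : Int) - 1) (w - 1) y w.toNat 0 st)
    (fun st y => ((pvTokLoop (PySem.Str.slice (PySem.List.pyGetD grid y "") none (some w))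
        y w w.toNat 0 [] []).1).foldl
      (pvProcessB (grid.length : Int) ((PySem.List.enumerate grid 0).map (fun p =>
        (pvTokenize (PySem.Str.slice p.2 none (some w)) p.1).2))) st)
    ([], PySem.Dict.empty)
    (fun st y hy => by
      have hy' := PySem.List.mem_pyRange_one.mp hy
      exact pv_rowLoop_eq grid _ w y hy'.1 hy'.2 hw0 (hcell' y hy'.1 hy'.2) hsym
        w.toNat 0 st (le_refl 0) (by omega))]
  rw [← List.foldl_flatMap]
  rw [List.nil_append, List.nil_append]
  have hlists : (PySem.List.enumerate grid 0).flatMap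
      (fun p : Int × String => (pvTokenize (PySem.Str.slice p.2 none (some w)) p.1).1)
      = (PySem.List.pyRange 0 (grid.length : Int) 1).flatMap
        (fun y => (pvTokLoop (PySem.Str.slice (PySem.List.pyGetD grid y "") none (some w))
          y w w.toNat 0 [] []).1) := by
    rw [PySem.List.enumerate_eq_map_pyRange grid "", PySem.List.len_eq, List.flatMap_map]
    refine List.flatMap_congr ?_
    intro y hy
    have hy' := PySem.List.mem_pyRange_one.mp hy
    show (pvTokenize (PySem.Str.slice (PySem.List.pyGetD grid y "") none (some w)) y).1 = _
    unfold pvTokenize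
    rw [pv_len_trunc _ _ hw0 (hlen' y hy'.1 hy'.2)]
  rw [hlists]


-- ===== VERDICT (by name: the statement is the Claim_ definition above) =====
theorem get_parts_and_gears_spec : Claim_equal_get_parts_and_gears := by
  intro grid _ hpre
  unfold Spec_get_parts_and_gears
  exact pv_ports_eq grid hpre
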